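-- pv_equiv track=rewrite | github.com/ArseniyKD/RIPAdvisors | backend/script.py | splittingFun
-- ===== SOURCE A (Python) =====
-- def splittingFun(time):
--     iterations = len(time) // 8
--     tuple_list = []
--     start = 0
--     end = 4
--     for i in range(iterations):
--         temp_tuple = (time[start:end], time[end:end + 4])
--         start += 8
--         end += 8
--         tuple_list.append(temp_tuple)
--
--     return tuple_list
-- ===== SOURCE B (Python) =====
-- def splittingFun(time):
--     n = (len(time) // 8) * 8
--     chunks = [time[i:i + 4] for i in range(0, n, 4)]
--     it = iter(chunks)
--     return list(zip(it, it))
-- ===== Notes on version B (the rewrite author's own statement) =====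
-- stated objective: alternative
-- what changed: Replaces A's single interleaved loop carrying start/end counters with two passes: flatten the truncated prefix into 4-element chunks, then pair adjacent chunks with the zip(it, it) grouper idiom.
import Mathlib
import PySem

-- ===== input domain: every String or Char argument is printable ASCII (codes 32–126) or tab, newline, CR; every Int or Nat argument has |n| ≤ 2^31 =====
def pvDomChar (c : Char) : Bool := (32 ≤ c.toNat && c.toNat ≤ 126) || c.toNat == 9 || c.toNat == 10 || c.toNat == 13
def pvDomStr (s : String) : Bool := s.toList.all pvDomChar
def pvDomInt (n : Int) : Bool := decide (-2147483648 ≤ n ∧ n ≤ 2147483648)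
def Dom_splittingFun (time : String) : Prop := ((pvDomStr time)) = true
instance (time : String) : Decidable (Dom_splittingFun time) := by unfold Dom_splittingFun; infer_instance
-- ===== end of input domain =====

-- B replaces A's single interleaved counter loop by two passes (chunk into 4s, then pair
-- adjacent chunks); objective: alternative decomposition, same cost.

-- ===== PORT A =====
-- literal port of A: iterations = len(time)//8; loop appending (time[start:end], time[end:end+4])
-- while advancing start/end by 8; state = (tuple_list, start, end)
def splittingFun (time : String) : List (String × String) :=
  let iterations := PySem.Int.floordiv (PySem.Str.len time) 8
  let st := (PySem.List.pyRange 0 iterations 1).foldl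
    (fun (st : List (String × String) × Int × Int) _i =>
      (st.1 ++ [(PySem.Str.slice time (some st.2.1) (some st.2.2),
                 PySem.Str.slice time (some st.2.2) (some (st.2.2 + 4)))],
       st.2.1 + 8, st.2.2 + 8))
    ([], 0, 4)
  st.1

-- ===== PORT B =====
-- port of Source B's zip(it, it) grouper: pair adjacent elements
def pairUp : List String → List (String × String)
  | a :: b :: rest => (a, b) :: pairUp rest
  | _ => []

def splittingFun_alt (time : String) : List (String × String) :=
  let n : Int := PySem.Int.floordiv (PySem.Str.len time) 8 * 8
  let chunks := (PySem.List.pyRange 0 n 4).map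
    (fun i => PySem.Str.slice time (some i) (some (i + 4)))
  pairUp chunks

-- ===== PRECONDITION & SPEC =====
def Spec_splittingFun (time : String) (out : List (String × String)) : Prop := out = splittingFun_alt time
instance (time : String) (out : List (String × String)) : Decidable (Spec_splittingFun time out) := by unfold Spec_splittingFun; infer_instance

-- ===== CLAIM (what is proved, stated in full; the proofs are below) =====
def Claim_equal_splittingFun : Prop := ∀ (time : String), Dom_splittingFun time → Spec_splittingFun time (splittingFun time)

-- ===== LEMMAS AND PROOFS =====

-- A's loop body as a state transformer (proof helper)
def pvStepA (time : String) (st : List (String × String) × Int × Int) :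
    List (String × String) × Int × Int :=
  (st.1 ++ [(PySem.Str.slice time (some st.2.1) (some st.2.2),
             PySem.Str.slice time (some st.2.2) (some (st.2.2 + 4)))],
   st.2.1 + 8, st.2.2 + 8)

theorem pvSliceCongr (t : String) {a b a' b' : Int} (ha : a = a') (hb : b = b') :
    PySem.Str.slice t (some a) (some b) = PySem.Str.slice t (some a') (some b') := by
  rw [ha, hb]

theorem pvFoldl_const {σ α : Type} (g : σ → σ) (l : List α) (init : σ) :
    l.foldl (fun st _ => g st) init = g^[l.length] init := by
  induction l generalizing init with
  | nil => rfl
  | cons a t ih => simp [List.foldl_cons, ih, Function.iterate_succ_apply]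

theorem pvIterA (time : String) : ∀ (k : Nat) (acc : List (String × String)) (s : Int),
    (pvStepA time)^[k] (acc, s, s + 4) =
      (acc ++ (List.range k).map (fun (j : Nat) =>
        (PySem.Str.slice time (some (s + 8 * (j : Int))) (some (s + 8 * (j : Int) + 4)),
         PySem.Str.slice time (some (s + 8 * (j : Int) + 4)) (some (s + 8 * (j : Int) + 8)))),
       s + 8 * (k : Int), s + 8 * (k : Int) + 4) := by
  intro k
  induction k with
  | zero => intro acc s; simp
  | succ k ih =>
    intro acc s
    rw [Function.iterate_succ_apply]
    have hg : pvStepA time (acc, s, s + 4) =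
        (acc ++ [(PySem.Str.slice time (some s) (some (s + 4)),
                  PySem.Str.slice time (some (s + 4)) (some (s + 4 + 4)))],
         s + 8, (s + 8) + 4) := by
      simp only [pvStepA, Prod.mk.injEq]
      refine ⟨trivial, trivial, by ring⟩
    rw [hg, ih]
    simp only [Prod.mk.injEq]
    refine ⟨?_, by push_cast; ring, by push_cast; ring⟩
    rw [List.range_succ_eq_map, List.map_cons, List.map_map, List.append_assoc]
    congr 1
    rw [List.singleton_append]
    congr 1
    · exact Prod.ext (pvSliceCongr _ (by push_cast; ring) (by push_cast; ring))
        (pvSliceCongr _ (by push_cast; ring) (by push_cast; ring))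
    · apply List.map_congr_left
      intro j _
      simp only [Function.comp_apply, Nat.succ_eq_add_one]
      exact Prod.ext (pvSliceCongr _ (by push_cast; ring) (by push_cast; ring))
        (pvSliceCongr _ (by push_cast; ring) (by push_cast; ring))

theorem pvPairUp_map (k : Nat) (f : Nat → String) :
    pairUp ((List.range (2 * k)).map f) =
      (List.range k).map (fun j => (f (2 * j), f (2 * j + 1))) := by
  induction k generalizing f with
  | zero => rfl
  | succ k ih =>
    have h2 : 2 * (k + 1) = (2 * k + 1) + 1 := by ring
    rw [h2, List.range_succ_eq_map, List.range_succ_eq_map]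
    simp only [List.map_cons, List.map_map, Function.comp_def, Nat.succ_eq_add_one]
    rw [pairUp, ih (fun j => f (j + 1 + 1))]
    rw [List.range_succ_eq_map]
    simp only [List.map_cons, List.map_map, Function.comp_def, Nat.succ_eq_add_one]
    refine List.cons_eq_cons.mpr ⟨by norm_num, ?_⟩
    apply List.map_congr_left
    intro j _
    have e1 : 2 * j + 1 + 1 = 2 * (j + 1) := by omega
    rw [e1]

theorem pvLen_floordiv (time : String) :
    PySem.Int.floordiv (PySem.Str.len time) 8 = ((time.toList.length / 8 : Nat) : Int) := by
  rw [PySem.Str.len_eq, PySem.Int.floordiv_eq_ediv_of_pos (by norm_num)]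
  omega

theorem pvMain (time : String) : splittingFun time = splittingFun_alt time := by
  simp only [splittingFun, splittingFun_alt, pvLen_floordiv]
  generalize time.toList.length / 8 = k
  have hfun : (fun (st : List (String × String) × Int × Int) (_i : Int) =>
      (st.1 ++ [(PySem.Str.slice time (some st.2.1) (some st.2.2),
                 PySem.Str.slice time (some st.2.2) (some (st.2.2 + 4)))],
       st.2.1 + 8, st.2.2 + 8)) = (fun st _i => pvStepA time st) := rfl
  rw [hfun, pvFoldl_const (pvStepA time)]
  have hlen : (PySem.List.pyRange 0 ((k : Int)) 1).length = k := by
    rw [PySem.List.length_pyRange_one]; omega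
  rw [hlen,
    show (([], 0, 4) : List (String × String) × Int × Int) = ([], 0, (0 : Int) + 4) from rfl,
    pvIterA time k [] 0]
  have hif : (if (0 : Int) < (k : Int) * 8 then (((k : Int) * 8 - 0 + 4 - 1) / 4).toNat else 0)
      = 2 * k := by split_ifs with h <;> omega
  have hn : (PySem.List.pyRange 0 ((k : Int) * 8) 4) =
      (List.range (2 * k)).map (fun (j : Nat) => (0 : Int) + 4 * (j : Int)) := by
    rw [PySem.List.pyRange_of_pos 0 ((k : Int) * 8) (by norm_num), hif]
  rw [hn, List.map_map, pvPairUp_map]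
  simp only [List.nil_append, Function.comp_apply]
  apply List.map_congr_left
  intro j _
  exact Prod.ext (pvSliceCongr _ (by push_cast; ring) (by push_cast; ring))
    (pvSliceCongr _ (by push_cast; ring) (by push_cast; ring))

-- ===== VERDICT (by name: the statement is the Claim_ definition above) =====
theorem splittingFun_spec : Claim_equal_splittingFun := by
  intro time _
  unfold Spec_splittingFun
  exact pvMain time
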